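-- pv_equiv track=rewrite | github.com/gurusha01/air-agent | air/view_trajectory.py | extract_feedback_from_next_prompt
-- ===== SOURCE A (Python) =====
-- def extract_feedback_from_next_prompt(next_turn: dict | None) -> str:
--     """Extract env feedback from the next turn's prompt (last user message)."""
--     if not next_turn:
--         return "(end of episode)"
--
--     prompt = next_turn.get("prompt", [])
--     if not prompt:
--         return "(no prompt)"
--
--     # Find the last user message - that's the env response
--     user_msgs = [m for m in prompt if isinstance(m, dict) and m.get("role") == "user"]
--     if user_msgs:
--         return user_msgs[-1].get("content", "(empty)")
--
--     return "(no user message)"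
-- ===== SOURCE B (Python) =====
-- def extract_feedback_from_next_prompt(next_turn: dict | None) -> str:
--     """Extract env feedback from the next turn's prompt (last user message)."""
--     if not next_turn:
--         return "(end of episode)"
--     prompt = next_turn.get("prompt", [])
--     if not prompt:
--         return "(no prompt)"
--     # Scan back-to-front and return on the first user message found.
--     for m in reversed(prompt):
--         if isinstance(m, dict) and m.get("role") == "user":
--             return m.get("content", "(empty)")
--     return "(no user message)"
-- ===== Notes on version B (the rewrite author's own statement) =====
-- stated objective: simpler
-- what changed: Instead of building the full list of user messages and taking its last element, B scans the prompt in reverse and returns on the first user message it finds.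
import Mathlib
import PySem

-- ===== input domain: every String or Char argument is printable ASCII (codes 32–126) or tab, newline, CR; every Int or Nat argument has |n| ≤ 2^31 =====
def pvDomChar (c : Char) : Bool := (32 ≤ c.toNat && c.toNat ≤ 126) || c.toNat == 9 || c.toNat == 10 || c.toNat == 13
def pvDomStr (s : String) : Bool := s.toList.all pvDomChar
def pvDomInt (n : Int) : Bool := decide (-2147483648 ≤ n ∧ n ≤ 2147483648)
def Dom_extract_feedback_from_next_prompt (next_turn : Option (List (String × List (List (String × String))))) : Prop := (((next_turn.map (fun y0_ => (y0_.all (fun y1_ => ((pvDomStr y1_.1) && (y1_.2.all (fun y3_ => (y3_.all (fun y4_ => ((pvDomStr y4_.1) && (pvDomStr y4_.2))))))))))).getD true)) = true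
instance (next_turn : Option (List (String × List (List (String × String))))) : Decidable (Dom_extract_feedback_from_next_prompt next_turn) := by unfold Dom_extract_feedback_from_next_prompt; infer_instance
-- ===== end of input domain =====

-- B replaces the build-all-user-messages-then-take-last pass by a reverse scan
-- that returns at the first user message (objective: simpler).


-- ===== PORT A =====
def extract_feedback_from_next_prompt (next_turn : Option (List (String × List (List (String × String))))) : String :=
  match next_turn with
  | none => "(end of episode)"
  | some d =>
    if d = [] then "(end of episode)"
    else
      let prompt := (PySem.Dict.mk d).getD "prompt" []
      if prompt = [] then "(no prompt)"
      else
        -- every m is a dict in this typed port, so 'isinstance(m, dict)' is True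
        let user_msgs := prompt.filter (fun m => (PySem.Dict.mk m).get? "role" == some "user")
        match user_msgs.getLast? with
        | some m => (PySem.Dict.mk m).getD "content" "(empty)"
        | none => "(no user message)"

-- ===== PORT B =====
-- the 'for m in reversed(prompt): if …: return' loop
def pvFindUser (l : List (List (String × String))) : Option (List (String × String)) :=
  match l with
  | [] => none
  | m :: rest =>
    if (PySem.Dict.mk m).get? "role" == some "user" then some m else pvFindUser rest

def extract_feedback_from_next_prompt_alt (next_turn : Option (List (String × List (List (String × String))))) : String :=
  match next_turn with
  | none => "(end of episode)"
  | some d =>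
    if d = [] then "(end of episode)"
    else
      let prompt := (PySem.Dict.mk d).getD "prompt" []
      if prompt = [] then "(no prompt)"
      else
        match pvFindUser prompt.reverse with
        | some m => (PySem.Dict.mk m).getD "content" "(empty)"
        | none => "(no user message)"

-- ===== PRECONDITION & SPEC =====
def Spec_extract_feedback_from_next_prompt (next_turn : Option (List (String × List (List (String × String))))) (out : String) : Prop := out = extract_feedback_from_next_prompt_alt next_turn
instance (next_turn : Option (List (String × List (List (String × String))))) (out : String) : Decidable (Spec_extract_feedback_from_next_prompt next_turn out) := by unfold Spec_extract_feedback_from_next_prompt; infer_instance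

-- ===== CLAIM (what is proved, stated in full; the proofs are below) =====
def Claim_equal_extract_feedback_from_next_prompt : Prop := ∀ (next_turn : Option (List (String × List (List (String × String))))), Dom_extract_feedback_from_next_prompt next_turn → Spec_extract_feedback_from_next_prompt next_turn (extract_feedback_from_next_prompt next_turn)

-- ===== LEMMAS AND PROOFS =====
theorem pvFindUser_eq_find? (l : List (List (String × String))) :
    pvFindUser l = l.find? (fun m => (PySem.Dict.mk m).get? "role" == some "user") := by
  induction l with
  | nil => rfl
  | cons m rest ih =>
    rw [pvFindUser, ih, List.find?_cons]
    by_cases h : ((PySem.Dict.mk m).get? "role" == some "user") = true <;> simp [h]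

theorem find?_eq_head?_filter {α : Type} (p : α → Bool) (l : List α) :
    l.find? p = (l.filter p).head? := by
  induction l with
  | nil => rfl
  | cons a t ih =>
    cases h : p a with
    | true => rw [List.find?_cons_of_pos h, List.filter_cons_of_pos h, List.head?_cons]
    | false => rw [List.find?_cons_of_neg (by simp [h]), List.filter_cons_of_neg (by simp [h]), ih]

theorem pvFindUser_reverse_eq_getLast?_filter (l : List (List (String × String))) :
    pvFindUser l.reverse
      = (l.filter (fun m => (PySem.Dict.mk m).get? "role" == some "user")).getLast? := by
  rw [pvFindUser_eq_find?, find?_eq_head?_filter]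
  simp [List.filter_reverse, List.head?_reverse]

-- ===== VERDICT (by name: the statement is the Claim_ definition above) =====
theorem extract_feedback_from_next_prompt_spec : Claim_equal_extract_feedback_from_next_prompt := by
  intro next_turn _
  unfold Spec_extract_feedback_from_next_prompt extract_feedback_from_next_prompt
    extract_feedback_from_next_prompt_alt
  match next_turn with
  | none => rfl
  | some d =>
    simp only
    split
    · rfl
    · rw [pvFindUser_reverse_eq_getLast?_filter]
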